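-- pv_equiv track=rewrite | github.com/Shloub/metalang | out/euler21.py | sumdivaux
-- ===== SOURCE A (Python) =====
-- def sumdivaux2(t, n, i):
--     while (i < n and t[i] == 0):
--         i += 1
--     return i
--
-- def sumdivaux(t, n, i):
--     if i > n:
--         return 1
--     elif t[i] == 0:
--         return sumdivaux(t, n, sumdivaux2(t, n, i + 1))
--     else:
--         o = sumdivaux(t, n, sumdivaux2(t, n, i + 1))
--         out0 = 0
--         p = i
--         for j in range(1, 1 + t[i]):
--             out0 += p
--             p *= i
--         return (out0 + 1) * o
-- ===== SOURCE B (Python) =====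
-- def sumdivaux(t, n, i):
--     # Single iterative pass: skip zero entries inline instead of the
--     # two-function recursion; multiply factors into an accumulator.
--     result = 1
--     while i <= n:
--         e = t[i]
--         if e != 0:
--             out0 = 0
--             p = i
--             for j in range(1, 1 + e):
--                 out0 += p
--                 p *= i
--             result *= out0 + 1
--         i += 1
--     return result
-- ===== Notes on version B (the rewrite author's own statement) =====
-- stated objective: simpler
-- what changed: Replaced the mutual recursion (sumdivaux + the zero-skipping helper sumdivaux2) by one iterative while-loop with a running product that skips zero entries inline.
import Mathlib
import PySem

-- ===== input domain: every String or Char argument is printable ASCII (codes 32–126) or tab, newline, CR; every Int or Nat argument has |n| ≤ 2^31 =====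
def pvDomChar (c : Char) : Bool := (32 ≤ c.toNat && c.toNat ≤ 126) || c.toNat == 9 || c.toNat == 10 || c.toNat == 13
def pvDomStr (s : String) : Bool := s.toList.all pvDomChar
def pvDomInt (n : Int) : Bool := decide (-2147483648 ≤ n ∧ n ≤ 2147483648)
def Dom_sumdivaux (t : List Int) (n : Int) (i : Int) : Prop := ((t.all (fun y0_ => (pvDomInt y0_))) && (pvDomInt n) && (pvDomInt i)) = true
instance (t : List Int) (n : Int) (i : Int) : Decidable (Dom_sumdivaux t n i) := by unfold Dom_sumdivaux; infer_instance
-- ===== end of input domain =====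

-- B replaces the two-function recursion by one iterative pass with a running product (objective: simpler).

-- ===== PORT A =====
-- while (i < n and t[i] == 0): i += 1; return i
def sumdivaux2 (t : List Int) (n : Int) (i : Int) : Int :=
  if _h : i < n ∧ (PySem.List.pyGet? t i).getD 0 = 0 then
    sumdivaux2 t n (i + 1)
  else i
termination_by (n - i).toNat
decreasing_by omega

theorem le_sumdivaux2 (t : List Int) (n : Int) (i : Int) : i ≤ sumdivaux2 t n i := by
  rw [sumdivaux2]
  split
  · have := le_sumdivaux2 t n (i + 1)
    omega
  · exact le_refl i
termination_by (n - i).toNat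
decreasing_by omega

def sumdivaux (t : List Int) (n : Int) (i : Int) : Int :=
  if _h : i > n then 1
  else if (PySem.List.pyGet? t i).getD 0 = 0 then
    sumdivaux t n (sumdivaux2 t n (i + 1))
  else
    let o := sumdivaux t n (sumdivaux2 t n (i + 1))
    let s := (PySem.List.pyRange 1 (1 + (PySem.List.pyGet? t i).getD 0) 1).foldl
      (fun (st : Int × Int) _ => (st.1 + st.2, st.2 * i)) (0, i)
    (s.1 + 1) * o
termination_by (n + 1 - i).toNat
decreasing_by
  · have := le_sumdivaux2 t n (i + 1); omega
  · have := le_sumdivaux2 t n (i + 1); omega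

-- ===== PORT B =====
def sumdivauxAltLoop (t : List Int) (n : Int) (i : Int) (result : Int) : Int :=
  if _h : i ≤ n then
    let e := (PySem.List.pyGet? t i).getD 0
    let result' :=
      if e ≠ 0 then
        let s := (PySem.List.pyRange 1 (1 + e) 1).foldl
          (fun (st : Int × Int) _ => (st.1 + st.2, st.2 * i)) (0, i)
        result * (s.1 + 1)
      else result
    sumdivauxAltLoop t n (i + 1) result'
  else result
termination_by (n + 1 - i).toNat
decreasing_by omega

def sumdivaux_alt (t : List Int) (n : Int) (i : Int) : Int :=
  sumdivauxAltLoop t n i 1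

-- ===== PRECONDITION & SPEC =====
-- Pre_ = exactly the inputs where A returns: either i > n (no access) or every
-- accessed index i..n is a valid Python index of t (no IndexError).
def Pre_sumdivaux (t : List Int) (n : Int) (i : Int) : Prop :=
  i > n ∨ (-(t.length : Int) ≤ i ∧ n < (t.length : Int))
instance (t : List Int) (n : Int) (i : Int) : Decidable (Pre_sumdivaux t n i) := by
  unfold Pre_sumdivaux; infer_instance

def pvWitness_sumdivaux : List Int × Int × Int := ([2, 0, 1], 2, 0)

def Spec_sumdivaux (t : List Int) (n : Int) (i : Int) (out : Int) : Prop := out = sumdivaux_alt t n i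
instance (t : List Int) (n : Int) (i : Int) (out : Int) : Decidable (Spec_sumdivaux t n i out) := by unfold Spec_sumdivaux; infer_instance

-- ===== CLAIM (what is proved, stated in full; the proofs are below) =====
def Claim_equal_sumdivaux : Prop := ∀ (t : List Int) (n : Int) (i : Int), Dom_sumdivaux t n i → Pre_sumdivaux t n i → Spec_sumdivaux t n i (sumdivaux t n i)

-- ===== LEMMAS AND PROOFS =====

-- Skipping zero entries does not change the loop's accumulator.
theorem loop_skip (t : List Int) (n : Int) (i : Int) (r : Int) :
    sumdivauxAltLoop t n i r = sumdivauxAltLoop t n (sumdivaux2 t n i) r := by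
  rw [sumdivaux2]
  split
  · rename_i h
    have hstep : sumdivauxAltLoop t n i r = sumdivauxAltLoop t n (i + 1) r := by
      rw [sumdivauxAltLoop]
      simp [h.1, le_of_lt, h.2]
    rw [hstep]
    exact loop_skip t n (i + 1) r
  · rfl
termination_by (n - i).toNat
decreasing_by omega

-- Main invariant: the iterative loop computes r times A's recursive value.
theorem loop_eq (t : List Int) (n : Int) :
    ∀ (k : Nat) (i r : Int), (n + 1 - i).toNat = k →
      Pre_sumdivaux t n i → sumdivauxAltLoop t n i r = r * sumdivaux t n i := by
  intro k
  induction k using Nat.strong_induction_on with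
  | _ k ih =>
    intro i r hk hpre
    by_cases hgt : i > n
    · rw [sumdivauxAltLoop, sumdivaux]
      simp [hgt, not_le.mpr hgt]
    · have hle : i ≤ n := not_lt.mp hgt
      have hlen : -(t.length : Int) ≤ i ∧ n < (t.length : Int) := by
        rcases hpre with h | h; · omega
        · exact h
      have hs := le_sumdivaux2 t n (i + 1)
      set s := sumdivaux2 t n (i + 1) with hs_def
      have hpre' : Pre_sumdivaux t n s := by
        unfold Pre_sumdivaux; omega
      have hrec : ∀ r' : Int, sumdivauxAltLoop t n s r' = r' * sumdivaux t n s := by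
        intro r'
        exact ih (n + 1 - s).toNat (by omega) s r' rfl hpre'
      by_cases hz : (PySem.List.pyGet? t i).getD 0 = 0
      · rw [sumdivauxAltLoop, sumdivaux]
        simp [hle, hgt, hz]
        rw [loop_skip t n (i + 1) r, ← hs_def, hrec r]
      · rw [sumdivauxAltLoop, sumdivaux]
        simp only [hle, dif_pos, hgt, hz, if_neg, ite_false, if_false,
          dite_eq_ite, ne_eq, not_false_eq_true, ite_true]
        rw [loop_skip t n (i + 1) _, ← hs_def, hrec]
        ring

-- ===== VERDICT (by name: the statement is the Claim_ definition above) =====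
theorem sumdivaux_spec : Claim_equal_sumdivaux := by
  intro t n i _ hpre
  unfold Spec_sumdivaux sumdivaux_alt
  rw [loop_eq t n (n + 1 - i).toNat i 1 rfl hpre, one_mul]
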